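-- pv_equiv track=rewrite | github.com/xuanfeng233-coder/CommandCraft | backend/skills/structural_validator.py | _tokenize_args
-- ===== SOURCE A (Python) =====
-- def _tokenize_args(raw: str) -> list[str]:
--     """Tokenize command arguments, respecting brackets, braces, and quotes.
--
--     - ``@a[type=zombie,r=10]`` is one token
--     - ``{"rawtext":[...]}`` is one token
--     - ``"quoted string"`` is one token
--     """
--     tokens: list[str] = []
--     raw = raw.strip()
--     if not raw:
--         return tokens
--
--     i = 0
--     length = len(raw)
--
--     while i < length:
--         # Skip whitespace
--         while i < length and raw[i] == " ":
--             i += 1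
--         if i >= length:
--             break
--
--         ch = raw[i]
--
--         if ch == '"':
--             # Quoted string — scan to matching unescaped quote
--             end = i + 1
--             while end < length:
--                 if raw[end] == "\\" and end + 1 < length:
--                     end += 2
--                     continue
--                 if raw[end] == '"':
--                     end += 1
--                     break
--                 end += 1
--             tokens.append(raw[i:end])
--             i = end
--
--         elif ch == "{":
--             # JSON object — match balanced braces
--             end = _scan_balanced(raw, i, "{", "}")
--             tokens.append(raw[i:end])
--             i = end
--
--         else:
--             # Regular token; handle embedded [...] and {...}
--             end = i
--             while end < length and raw[end] != " ":
--                 if raw[end] == "[":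
--                     end = _scan_balanced(raw, end, "[", "]")
--                 elif raw[end] == "{":
--                     end = _scan_balanced(raw, end, "{", "}")
--                 else:
--                     end += 1
--             tokens.append(raw[i:end])
--             i = end
--
--     return tokens
--
-- def _scan_balanced(text: str, start: int, open_ch: str, close_ch: str) -> int:
--     """Scan from *start* to find the matching close bracket/brace.
--
--     Respects string quoting. Returns the index **after** the closing character.
--     """
--     depth = 0
--     in_str = False
--     esc = False
--     i = start
--
--     while i < len(text):
--         c = text[i]
--         if esc:
--             esc = False
--             i += 1
--             continue
--         if c == "\\" and in_str:
--             esc = True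
--             i += 1
--             continue
--         if c == '"':
--             in_str = not in_str
--         elif not in_str:
--             if c == open_ch:
--                 depth += 1
--             elif c == close_ch:
--                 depth -= 1
--                 if depth == 0:
--                     return i + 1
--         i += 1
--
--     return len(text)  # unbalanced — consume rest
-- ===== SOURCE B (Python) =====
-- def _tokenize_args(raw: str) -> list[str]:
--     """Single-pass character state machine: one flat loop over the stripped
--     string with explicit mode (top / quoted-token / bracket-run) replacing
--     the index-jumping inner scans and the _scan_balanced helper."""
--     raw = raw.strip()
--     tokens = []
--     cur = []            # characters of the current token
--     mode = "top"        # "top" | "quote" | "bal"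
--     esc = False         # an escape is pending
--     emit_at_close = False
--     open_ch = close_ch = ""
--     depth = 0
--     in_str = False
--     for c in raw:
--         if mode == "quote":
--             cur.append(c)
--             if esc:
--                 esc = False
--             elif c == "\\":
--                 esc = True
--             elif c == '"':
--                 tokens.append("".join(cur))
--                 cur = []
--                 mode = "top"
--         elif mode == "bal":
--             cur.append(c)
--             if esc:
--                 esc = False
--             elif c == "\\" and in_str:
--                 esc = True
--             elif c == '"':
--                 in_str = not in_str
--             elif not in_str:
--                 if c == open_ch:
--                     depth += 1
--                 elif c == close_ch:
--                     depth -= 1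
--                     if depth == 0:
--                         if emit_at_close:
--                             tokens.append("".join(cur))
--                             cur = []
--                         mode = "top"
--         else:  # top level
--             if c == " ":
--                 if cur:
--                     tokens.append("".join(cur))
--                     cur = []
--             elif c == '"' and not cur:
--                 mode = "quote"
--                 esc = False
--                 cur.append(c)
--             elif c == "{" or c == "[":
--                 mode = "bal"
--                 emit_at_close = (c == "{" and not cur)
--                 open_ch, close_ch = ("{", "}") if c == "{" else ("[", "]")
--                 depth = 1
--                 in_str = False
--                 esc = False
--                 cur.append(c)
--             else:
--                 cur.append(c)
--     if cur:
--         tokens.append("".join(cur))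
--     return tokens
-- ===== Notes on version B (the rewrite author's own statement) =====
-- stated objective: alternative
-- what changed: A tokenizes with an index-jumping outer loop that calls a recursive-style forward scanner (_scan_balanced) and separate inner scans for quotes and words, slicing tokens out by index; B is a single flat pass over the characters driven by an explicit state machine (top / quoted-token / bracket-run mode with depth, in-string and escape flags) that accumulates the current token and emits it at boundaries, with no helper and no index arithmetic.
import Mathlib
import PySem

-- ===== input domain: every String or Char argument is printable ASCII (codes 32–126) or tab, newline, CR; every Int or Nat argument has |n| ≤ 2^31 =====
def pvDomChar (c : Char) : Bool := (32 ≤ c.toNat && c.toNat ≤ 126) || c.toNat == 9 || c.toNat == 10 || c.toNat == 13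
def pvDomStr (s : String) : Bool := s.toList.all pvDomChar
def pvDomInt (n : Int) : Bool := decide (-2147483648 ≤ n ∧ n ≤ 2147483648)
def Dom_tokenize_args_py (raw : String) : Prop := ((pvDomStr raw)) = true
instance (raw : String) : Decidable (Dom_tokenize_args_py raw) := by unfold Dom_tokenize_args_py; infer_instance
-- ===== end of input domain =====

-- B replaces A's index-jumping scans and the _scan_balanced helper by one flat
-- state-machine pass over the characters (objective: alternative; same O(n) cost).

-- ===== PORT A =====
-- Each while loop becomes structural recursion on a fuel counter. The fuel is only a
-- totality guard: every call supplies fuel > s.length - i and the position strictly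
-- increases each iteration, so the 0-fuel branch is never reached; every other step is
-- the Python's, line for line.

-- _scan_balanced(text, start, open_ch, close_ch)
def pvA_scan (s : List Char) (oc cc : Char) (fuel : Nat) (depth : Int) (inStr esc : Bool) (i : Nat) : Nat :=
  match fuel with
  | 0 => s.length
  | fuel + 1 =>
    if h : i < s.length then
      if esc then pvA_scan s oc cc fuel depth inStr false (i+1)
      else if s[i] = '\\' ∧ inStr = true then pvA_scan s oc cc fuel depth inStr true (i+1)
      else if s[i] = '"' then pvA_scan s oc cc fuel depth (!inStr) esc (i+1)
      else if inStr = false then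
        if s[i] = oc then pvA_scan s oc cc fuel (depth+1) inStr esc (i+1)
        else if s[i] = cc then
          if depth - 1 = 0 then i + 1 else pvA_scan s oc cc fuel (depth-1) inStr esc (i+1)
        else pvA_scan s oc cc fuel depth inStr esc (i+1)
      else pvA_scan s oc cc fuel depth inStr esc (i+1)
    else s.length

-- the quoted-string scan (the '"' branch's while loop)
def pvA_quote (s : List Char) (fuel : Nat) (e : Nat) : Nat :=
  match fuel with
  | 0 => e
  | fuel + 1 =>
    if h : e < s.length then
      if s[e] = '\\' ∧ e + 1 < s.length then pvA_quote s fuel (e+2)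
      else if s[e] = '"' then e + 1
      else pvA_quote s fuel (e+1)
    else e

-- the whitespace-skipping inner while loop
def pvA_skip (s : List Char) (fuel : Nat) (i : Nat) : Nat :=
  match fuel with
  | 0 => i
  | fuel + 1 =>
    if h : i < s.length then
      if s[i] = ' ' then pvA_skip s fuel (i+1) else i
    else i

-- the regular-token while loop (handles embedded [...] and {...})
def pvA_word (s : List Char) (fuel : Nat) (e : Nat) : Nat :=
  match fuel with
  | 0 => e
  | fuel + 1 =>
    if h : e < s.length then
      if s[e] = ' ' then e
      else if s[e] = '[' then pvA_word s fuel (pvA_scan s '[' ']' (s.length + 1) 0 false false e)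
      else if s[e] = '{' then pvA_word s fuel (pvA_scan s '{' '}' (s.length + 1) 0 false false e)
      else pvA_word s fuel (e+1)
    else e

-- the main while loop; raw[i:end] for natural i ≤ end is exactly (s.drop i).take (end - i)
def pvA_main (s : List Char) (fuel : Nat) (tokens : List String) (i : Nat) : List String :=
  match fuel with
  | 0 => tokens
  | fuel + 1 =>
    if h : i < s.length then
      if hj : pvA_skip s (s.length + 1) i < s.length then
        if s[pvA_skip s (s.length + 1) i] = '"' then
          pvA_main s fuel (tokens ++ [String.ofList ((s.drop (pvA_skip s (s.length + 1) i)).take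
              (pvA_quote s (s.length + 1) (pvA_skip s (s.length + 1) i + 1) - pvA_skip s (s.length + 1) i))])
            (pvA_quote s (s.length + 1) (pvA_skip s (s.length + 1) i + 1))
        else if s[pvA_skip s (s.length + 1) i] = '{' then
          pvA_main s fuel (tokens ++ [String.ofList ((s.drop (pvA_skip s (s.length + 1) i)).take
              (pvA_scan s '{' '}' (s.length + 1) 0 false false (pvA_skip s (s.length + 1) i) - pvA_skip s (s.length + 1) i))])
            (pvA_scan s '{' '}' (s.length + 1) 0 false false (pvA_skip s (s.length + 1) i))
        else
          pvA_main s fuel (tokens ++ [String.ofList ((s.drop (pvA_skip s (s.length + 1) i)).take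
              (pvA_word s (s.length + 1) (pvA_skip s (s.length + 1) i) - pvA_skip s (s.length + 1) i))])
            (pvA_word s (s.length + 1) (pvA_skip s (s.length + 1) i))
      else tokens
    else tokens

def tokenize_args_py (raw : String) : List String :=
  pvA_main (PySem.Str.strip raw).toList ((PySem.Str.strip raw).toList.length + 1) [] 0

-- ===== PORT B =====
inductive PvMode
  | top
  | quote (esc : Bool)
  | bal (emit : Bool) (oc cc : Char) (depth : Int) (inStr esc : Bool)
deriving DecidableEq, Repr

structure PvSt where
  tokens : List String
  cur : List Char
  mode : PvMode
deriving DecidableEq, Repr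

-- one step of Source B's single for-loop
def pvB_step (st : PvSt) (c : Char) : PvSt :=
  match st.mode with
  | .quote esc =>
      let cur := st.cur ++ [c]
      if esc then { st with cur := cur, mode := .quote false }
      else if c = '\\' then { st with cur := cur, mode := .quote true }
      else if c = '"' then { tokens := st.tokens ++ [String.ofList cur], cur := [], mode := .top }
      else { st with cur := cur }
  | .bal emit oc cc depth inStr esc =>
      let cur := st.cur ++ [c]
      if esc then { st with cur := cur, mode := .bal emit oc cc depth inStr false }
      else if c = '\\' ∧ inStr = true then { st with cur := cur, mode := .bal emit oc cc depth inStr true }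
      else if c = '"' then { st with cur := cur, mode := .bal emit oc cc depth (!inStr) esc }
      else if inStr = false then
        if c = oc then { st with cur := cur, mode := .bal emit oc cc (depth+1) inStr esc }
        else if c = cc then
          if depth - 1 = 0 then
            if emit then { tokens := st.tokens ++ [String.ofList cur], cur := [], mode := .top }
            else { st with cur := cur, mode := .top }
          else { st with cur := cur, mode := .bal emit oc cc (depth-1) inStr esc }
        else { st with cur := cur }
      else { st with cur := cur }
  | .top =>
      if c = ' ' then
        if st.cur = [] then st
        else { tokens := st.tokens ++ [String.ofList st.cur], cur := [], mode := .top }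
      else if c = '"' ∧ st.cur = [] then { st with cur := st.cur ++ [c], mode := .quote false }
      else if c = '{' ∨ c = '[' then
        { st with
          cur := st.cur ++ [c]
          mode := .bal (decide (c = '{' ∧ st.cur = [])) (if c = '{' then '{' else '[')
                       (if c = '{' then '}' else ']') 1 false false }
      else { st with cur := st.cur ++ [c] }

def pvB_finish (st : PvSt) : List String :=
  if st.cur = [] then st.tokens else st.tokens ++ [String.ofList st.cur]

def tokenize_args_py_alt (raw : String) : List String :=
  pvB_finish ((PySem.Str.strip raw).toList.foldl pvB_step ⟨[], [], .top⟩)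

-- ===== PRECONDITION & SPEC =====
def Spec_tokenize_args_py (raw : String) (out : List String) : Prop := out = tokenize_args_py_alt raw
instance (raw : String) (out : List String) : Decidable (Spec_tokenize_args_py raw out) := by unfold Spec_tokenize_args_py; infer_instance

-- ===== CLAIM (what is proved, stated in full; the proofs are below) =====
def Claim_equal_tokenize_args_py : Prop := ∀ (raw : String), Dom_tokenize_args_py raw → Spec_tokenize_args_py raw (tokenize_args_py raw)

-- ===== LEMMAS AND PROOFS =====

theorem pvA_scan_oob (s : List Char) (oc cc : Char) (fuel : Nat) (d : Int) (b e : Bool) (i : Nat)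
    (h : s.length ≤ i) : pvA_scan s oc cc fuel d b e i = s.length := by
  cases fuel with
  | zero => rw [pvA_scan]
  | succ f => rw [pvA_scan]; simp [Nat.not_lt.mpr h]

theorem pvA_scan_lt (s : List Char) (oc cc : Char) (fuel : Nat) (d : Int) (b e : Bool) (i : Nat)
    (h : i < s.length) : i < pvA_scan s oc cc fuel d b e i := by
  induction fuel generalizing d b e i with
  | zero => rw [pvA_scan]; omega
  | succ f ih =>
    have key : ∀ (d' : Int) (b' e' : Bool), i < pvA_scan s oc cc f d' b' e' (i+1) := by
      intro d' b' e'
      rcases Nat.lt_or_ge (i+1) s.length with h' | h'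
      · exact Nat.lt_of_succ_lt (ih d' b' e' (i+1) h')
      · rw [pvA_scan_oob s oc cc f d' b' e' (i+1) h']; omega
    rw [pvA_scan]
    simp only [h, dif_pos]
    split_ifs <;> first | omega | apply key

theorem pvA_quote_ge (s : List Char) (fuel : Nat) (e : Nat) : e ≤ pvA_quote s fuel e := by
  induction fuel generalizing e with
  | zero => simp [pvA_quote]
  | succ f ih =>
    rw [pvA_quote]
    split_ifs with h1 h2 h3
    · have := ih (e+2); omega
    · omega
    · have := ih (e+1); omega
    · omega

theorem pvA_skip_ge (s : List Char) (fuel : Nat) (i : Nat) : i ≤ pvA_skip s fuel i := by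
  induction fuel generalizing i with
  | zero => simp [pvA_skip]
  | succ f ih =>
    rw [pvA_skip]
    split_ifs with h1 h2
    · have := ih (i+1); omega
    · omega
    · omega

theorem pvA_skip_ne (s : List Char) (fuel : Nat) : ∀ i : Nat, s.length - i < fuel →
    s.length ≤ pvA_skip s fuel i ∨ s[pvA_skip s fuel i]? ≠ some ' ' := by
  induction fuel with
  | zero => intro i hf; exact absurd hf (Nat.not_lt_zero _)
  | succ f ih =>
    intro i hf
    rw [pvA_skip]
    split_ifs with h1 h2
    · exact ih (i+1) (by omega)
    · right; rw [List.getElem?_eq_getElem h1]; simp [h2]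
    · left; omega

theorem pvA_word_ge (s : List Char) (fuel : Nat) (e : Nat) : e ≤ pvA_word s fuel e := by
  induction fuel generalizing e with
  | zero => simp [pvA_word]
  | succ f ih =>
    rw [pvA_word]
    split_ifs with h1 h2 h3 h4
    · omega
    · have h5 := pvA_scan_lt s '[' ']' (s.length + 1) 0 false false e h1
      have := ih (pvA_scan s '[' ']' (s.length + 1) 0 false false e); omega
    · have h5 := pvA_scan_lt s '{' '}' (s.length + 1) 0 false false e h1
      have := ih (pvA_scan s '{' '}' (s.length + 1) 0 false false e); omega
    · have := ih (e+1); omega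
    · omega

theorem pvA_word_lt (s : List Char) (fuel : Nat) (e : Nat) (hfu : 0 < fuel) (h : e < s.length)
    (hsp : s[e]? ≠ some ' ') : e < pvA_word s fuel e := by
  obtain ⟨f, rfl⟩ : ∃ f, fuel = f + 1 := ⟨fuel - 1, by omega⟩
  rw [pvA_word]
  rw [List.getElem?_eq_getElem h] at hsp
  have hsp' : ¬ (s[e] = ' ') := by intro hx; exact hsp (by rw [hx])
  simp only [h, dif_pos, hsp', if_false]
  split_ifs with h2 h3
  · have h5 := pvA_scan_lt s '[' ']' (s.length + 1) 0 false false e h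
    have := pvA_word_ge s f (pvA_scan s '[' ']' (s.length + 1) 0 false false e); omega
  · have h5 := pvA_scan_lt s '{' '}' (s.length + 1) 0 false false e h
    have := pvA_word_ge s f (pvA_scan s '{' '}' (s.length + 1) 0 false false e); omega
  · have := pvA_word_ge s f (e+1); omega

theorem pvSegCons (s : List Char) (e r : Nat) (h : e < s.length) (hr : e < r) :
    (s.drop e).take (r - e) = s[e] :: (s.drop (e+1)).take (r - (e+1)) := by
  rw [List.drop_eq_getElem_cons h]
  have : r - e = (r - (e+1)) + 1 := by omega
  rw [this, List.take_succ_cons]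

theorem pvSegSplit (s : List Char) (e r' r : Nat) (h1 : e ≤ r') (h2 : r' ≤ r) :
    (s.drop e).take (r - e) = (s.drop e).take (r' - e) ++ (s.drop r').take (r - r') := by
  rw [show r - e = (r' - e) + (r - r') by omega, List.take_add]
  have hd : (s.drop e).drop (r' - e) = s.drop r' := by
    rw [List.drop_drop]
    congr 1
    omega
  rw [hd]

theorem pvL_skip (s : List Char) (fuel : Nat) : ∀ (i : Nat) (t : List String), s.length - i < fuel →
    (s.drop (pvA_skip s fuel i)).foldl pvB_step ⟨t, [], .top⟩
      = (s.drop i).foldl pvB_step ⟨t, [], .top⟩ := by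
  induction fuel with
  | zero => intro i t hf; exact absurd hf (Nat.not_lt_zero _)
  | succ f ih =>
    intro i t hf
    rw [pvA_skip]
    split_ifs with h1 h2
    · rw [ih (i+1) t (by omega), List.drop_eq_getElem_cons h1, List.foldl_cons]
      have hst : pvB_step ⟨t, [], .top⟩ s[i] = ⟨t, [], .top⟩ := by
        simp [pvB_step, h2]
      rw [hst]
    · rfl
    · rfl

theorem pvL_quote (s : List Char) (fuel : Nat) : ∀ (e : Nat) (t : List String) (cur : List Char),
    cur ≠ [] → s.length - e < fuel →
    pvB_finish ((s.drop e).foldl pvB_step ⟨t, cur, .quote false⟩)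
      = pvB_finish ((s.drop (pvA_quote s fuel e)).foldl pvB_step
          ⟨t ++ [String.ofList (cur ++ (s.drop e).take (pvA_quote s fuel e - e))], [], .top⟩) := by
  induction fuel with
  | zero => intro e t cur hc hf; exact absurd hf (Nat.not_lt_zero _)
  | succ f ih =>
   intro e t cur hc hf
   by_cases h : e < s.length
   · rw [pvA_quote]
     simp only [dif_pos h]
     by_cases h1 : s[e] = '\\' ∧ e + 1 < s.length
     · obtain ⟨hb, hlt⟩ := h1
       rw [if_pos ⟨hb, hlt⟩]
       have hge : e + 2 ≤ pvA_quote s f (e+2) := pvA_quote_ge s f (e+2)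
       have htok : cur ++ (s.drop e).take (pvA_quote s f (e+2) - e)
           = ((cur ++ [s[e]]) ++ [s[e+1]]) ++ (s.drop (e+2)).take (pvA_quote s f (e+2) - (e+2)) := by
         rw [pvSegCons s e _ h (by omega), pvSegCons s (e+1) _ hlt (by omega)]
         simp
       rw [htok, List.drop_eq_getElem_cons h, List.foldl_cons]
       have hs1 : pvB_step ⟨t, cur, .quote false⟩ s[e] = ⟨t, cur ++ [s[e]], .quote true⟩ := by
         simp [pvB_step, hb]
       rw [hs1, List.drop_eq_getElem_cons hlt, List.foldl_cons]
       have hs2 : pvB_step ⟨t, cur ++ [s[e]], .quote true⟩ s[e+1]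
           = ⟨t, (cur ++ [s[e]]) ++ [s[e+1]], .quote false⟩ := by
         simp [pvB_step]
       rw [hs2, ih (e+2) t ((cur ++ [s[e]]) ++ [s[e+1]]) (by simp) (by omega)]
     · rw [if_neg h1]
       by_cases h2 : s[e] = '"'
       · rw [if_pos h2]
         have hseg : (s.drop e).take (e + 1 - e) = [s[e]] := by
           rw [pvSegCons s e (e+1) h (by omega)]
           simp
         rw [hseg, List.drop_eq_getElem_cons h, List.foldl_cons]
         have hs : pvB_step ⟨t, cur, .quote false⟩ s[e]
             = ⟨t ++ [String.ofList (cur ++ [s[e]])], [], .top⟩ := by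
           simp [pvB_step, h2]
         rw [hs]
       · by_cases hb : s[e] = '\\'
         · have hlen : ¬ (e + 1 < s.length) := fun hx => h1 ⟨hb, hx⟩
           have hr : pvA_quote s f (e+1) = e + 1 := by
             cases f with
             | zero => rw [pvA_quote]
             | succ f' => rw [pvA_quote]; simp [hlen]
           rw [if_neg h2, hr]
           have hseg : (s.drop e).take (e + 1 - e) = [s[e]] := by
             rw [pvSegCons s e (e+1) h (by omega)]
             simp
           rw [hseg, List.drop_eq_getElem_cons h, List.foldl_cons]
           have hs : pvB_step ⟨t, cur, .quote false⟩ s[e] = ⟨t, cur ++ [s[e]], .quote true⟩ := by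
             simp [pvB_step, hb]
           rw [hs]
           have hd : s.drop (e+1) = ([] : List Char) := List.drop_eq_nil_of_le (by omega)
           rw [hd]
           simp [pvB_finish]
         · rw [if_neg h2]
           have hge : e + 1 ≤ pvA_quote s f (e+1) := pvA_quote_ge s f (e+1)
           have htok : cur ++ (s.drop e).take (pvA_quote s f (e+1) - e)
               = (cur ++ [s[e]]) ++ (s.drop (e+1)).take (pvA_quote s f (e+1) - (e+1)) := by
             rw [pvSegCons s e _ h (by omega)]
             simp
           rw [htok, List.drop_eq_getElem_cons h, List.foldl_cons]
           have hs : pvB_step ⟨t, cur, .quote false⟩ s[e] = ⟨t, cur ++ [s[e]], .quote false⟩ := by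
             simp [pvB_step, hb, h2]
           rw [hs, ih (e+1) t (cur ++ [s[e]]) (by simp) (by omega)]
   · have hr : pvA_quote s (f+1) e = e := by
       rw [pvA_quote]
       simp [h]
     have hd : s.drop e = ([] : List Char) := List.drop_eq_nil_of_le (by omega)
     rw [hr, hd]
     simp [pvB_finish, hc]

theorem pvL_bal (s : List Char) (oc cc : Char) (fuel : Nat) : ∀ (e : Nat) (t : List String)
    (cur : List Char) (emit : Bool) (d : Int) (inStr esc : Bool),
    (cur ≠ [] ∨ e < s.length) → s.length - e < fuel →
    pvB_finish ((s.drop e).foldl pvB_step ⟨t, cur, .bal emit oc cc d inStr esc⟩)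
      = (if emit then
          pvB_finish ((s.drop (pvA_scan s oc cc fuel d inStr esc e)).foldl pvB_step
            ⟨t ++ [String.ofList (cur ++ (s.drop e).take (pvA_scan s oc cc fuel d inStr esc e - e))], [], .top⟩)
        else
          pvB_finish ((s.drop (pvA_scan s oc cc fuel d inStr esc e)).foldl pvB_step
            ⟨t, cur ++ (s.drop e).take (pvA_scan s oc cc fuel d inStr esc e - e), .top⟩)) := by
  induction fuel with
  | zero => intro e t cur emit d inStr esc hc hf; exact absurd hf (Nat.not_lt_zero _)
  | succ f ih =>
   intro e t cur emit d inStr esc hc hf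
   by_cases h : e < s.length
   · rw [pvA_scan]
     simp only [dif_pos h]
     by_cases hesc : esc = true
     · subst hesc
       rw [if_pos rfl]
       have hlt : e < pvA_scan s oc cc f d inStr false (e+1) := by
         rcases Nat.lt_or_ge (e+1) s.length with hx | hx
         · have := pvA_scan_lt s oc cc f d inStr false (e+1) hx; omega
         · rw [pvA_scan_oob s oc cc f d inStr false (e+1) hx]; omega
       have htok : cur ++ (s.drop e).take (pvA_scan s oc cc f d inStr false (e+1) - e)
           = (cur ++ [s[e]]) ++ (s.drop (e+1)).take (pvA_scan s oc cc f d inStr false (e+1) - (e+1)) := by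
         rw [pvSegCons s e _ h hlt]; simp
       rw [htok, List.drop_eq_getElem_cons h, List.foldl_cons]
       have hs : pvB_step ⟨t, cur, .bal emit oc cc d inStr true⟩ s[e]
           = ⟨t, cur ++ [s[e]], .bal emit oc cc d inStr false⟩ := by
         simp [pvB_step]
       rw [hs, ih (e+1) t (cur ++ [s[e]]) emit d inStr false (Or.inl (by simp)) (by omega)]
     · rw [Bool.not_eq_true] at hesc
       subst hesc
       rw [if_neg Bool.false_ne_true]
       by_cases hbs : s[e] = '\\' ∧ inStr = true
       · rw [if_pos hbs]
         have hlt : e < pvA_scan s oc cc f d inStr true (e+1) := by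
           rcases Nat.lt_or_ge (e+1) s.length with hx | hx
           · have := pvA_scan_lt s oc cc f d inStr true (e+1) hx; omega
           · rw [pvA_scan_oob s oc cc f d inStr true (e+1) hx]; omega
         have htok : cur ++ (s.drop e).take (pvA_scan s oc cc f d inStr true (e+1) - e)
             = (cur ++ [s[e]]) ++ (s.drop (e+1)).take (pvA_scan s oc cc f d inStr true (e+1) - (e+1)) := by
           rw [pvSegCons s e _ h hlt]; simp
         rw [htok, List.drop_eq_getElem_cons h, List.foldl_cons]
         have hs : pvB_step ⟨t, cur, .bal emit oc cc d inStr false⟩ s[e]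
             = ⟨t, cur ++ [s[e]], .bal emit oc cc d inStr true⟩ := by
           simp only [pvB_step, Bool.false_eq_true, if_false]
           rw [if_pos hbs]
         rw [hs, ih (e+1) t (cur ++ [s[e]]) emit d inStr true (Or.inl (by simp)) (by omega)]
       · rw [if_neg hbs]
         by_cases hq : s[e] = '"'
         · rw [if_pos hq]
           have hlt : e < pvA_scan s oc cc f d (!inStr) false (e+1) := by
             rcases Nat.lt_or_ge (e+1) s.length with hx | hx
             · have := pvA_scan_lt s oc cc f d (!inStr) false (e+1) hx; omega
             · rw [pvA_scan_oob s oc cc f d (!inStr) false (e+1) hx]; omega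
           have htok : cur ++ (s.drop e).take (pvA_scan s oc cc f d (!inStr) false (e+1) - e)
               = (cur ++ [s[e]]) ++ (s.drop (e+1)).take (pvA_scan s oc cc f d (!inStr) false (e+1) - (e+1)) := by
             rw [pvSegCons s e _ h hlt]; simp
           rw [htok, List.drop_eq_getElem_cons h, List.foldl_cons]
           have hs : pvB_step ⟨t, cur, .bal emit oc cc d inStr false⟩ s[e]
               = ⟨t, cur ++ [s[e]], .bal emit oc cc d (!inStr) false⟩ := by
             simp only [pvB_step, Bool.false_eq_true, if_false]
             rw [if_neg hbs, if_pos hq]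
           rw [hs, ih (e+1) t (cur ++ [s[e]]) emit d (!inStr) false (Or.inl (by simp)) (by omega)]
         · rw [if_neg hq]
           by_cases hin : inStr = false
           · subst hin
             rw [if_pos rfl]
             by_cases hoc : s[e] = oc
             · rw [if_pos hoc]
               have hlt : e < pvA_scan s oc cc f (d+1) false false (e+1) := by
                 rcases Nat.lt_or_ge (e+1) s.length with hx | hx
                 · have := pvA_scan_lt s oc cc f (d+1) false false (e+1) hx; omega
                 · rw [pvA_scan_oob s oc cc f (d+1) false false (e+1) hx]; omega
               have htok : cur ++ (s.drop e).take (pvA_scan s oc cc f (d+1) false false (e+1) - e)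
                   = (cur ++ [s[e]]) ++ (s.drop (e+1)).take (pvA_scan s oc cc f (d+1) false false (e+1) - (e+1)) := by
                 rw [pvSegCons s e _ h hlt]; simp
               rw [htok, List.drop_eq_getElem_cons h, List.foldl_cons]
               have hs : pvB_step ⟨t, cur, .bal emit oc cc d false false⟩ s[e]
                   = ⟨t, cur ++ [s[e]], .bal emit oc cc (d+1) false false⟩ := by
                 simp only [pvB_step, Bool.false_eq_true, and_false, if_false, if_true]
                 rw [if_neg hq, if_pos hoc]
               rw [hs, ih (e+1) t (cur ++ [s[e]]) emit (d+1) false false (Or.inl (by simp)) (by omega)]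
             · rw [if_neg hoc]
               by_cases hcc : s[e] = cc
               · rw [if_pos hcc]
                 by_cases hd0 : d - 1 = 0
                 · rw [if_pos hd0]
                   have hseg : (s.drop e).take (e + 1 - e) = [s[e]] := by
                     rw [pvSegCons s e (e+1) h (by omega)]; simp
                   rw [hseg, List.drop_eq_getElem_cons h, List.foldl_cons]
                   have hs : pvB_step ⟨t, cur, .bal emit oc cc d false false⟩ s[e]
                       = if emit then ⟨t ++ [String.ofList (cur ++ [s[e]])], [], .top⟩
                         else ⟨t, cur ++ [s[e]], .top⟩ := by
                     simp only [pvB_step, Bool.false_eq_true, and_false, if_false, if_true]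
                     rw [if_neg hq, if_neg hoc, if_pos hcc, if_pos hd0]
                   rw [hs]
                   cases emit <;> simp
                 · rw [if_neg hd0]
                   have hlt : e < pvA_scan s oc cc f (d-1) false false (e+1) := by
                     rcases Nat.lt_or_ge (e+1) s.length with hx | hx
                     · have := pvA_scan_lt s oc cc f (d-1) false false (e+1) hx; omega
                     · rw [pvA_scan_oob s oc cc f (d-1) false false (e+1) hx]; omega
                   have htok : cur ++ (s.drop e).take (pvA_scan s oc cc f (d-1) false false (e+1) - e)
                       = (cur ++ [s[e]]) ++ (s.drop (e+1)).take (pvA_scan s oc cc f (d-1) false false (e+1) - (e+1)) := by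
                     rw [pvSegCons s e _ h hlt]; simp
                   rw [htok, List.drop_eq_getElem_cons h, List.foldl_cons]
                   have hs : pvB_step ⟨t, cur, .bal emit oc cc d false false⟩ s[e]
                       = ⟨t, cur ++ [s[e]], .bal emit oc cc (d-1) false false⟩ := by
                     simp only [pvB_step, Bool.false_eq_true, and_false, if_false, if_true]
                     rw [if_neg hq, if_neg hoc, if_pos hcc, if_neg hd0]
                   rw [hs, ih (e+1) t (cur ++ [s[e]]) emit (d-1) false false (Or.inl (by simp)) (by omega)]
               · rw [if_neg hcc]
                 have hlt : e < pvA_scan s oc cc f d false false (e+1) := by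
                   rcases Nat.lt_or_ge (e+1) s.length with hx | hx
                   · have := pvA_scan_lt s oc cc f d false false (e+1) hx; omega
                   · rw [pvA_scan_oob s oc cc f d false false (e+1) hx]; omega
                 have htok : cur ++ (s.drop e).take (pvA_scan s oc cc f d false false (e+1) - e)
                     = (cur ++ [s[e]]) ++ (s.drop (e+1)).take (pvA_scan s oc cc f d false false (e+1) - (e+1)) := by
                   rw [pvSegCons s e _ h hlt]; simp
                 rw [htok, List.drop_eq_getElem_cons h, List.foldl_cons]
                 have hs : pvB_step ⟨t, cur, .bal emit oc cc d false false⟩ s[e]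
                     = ⟨t, cur ++ [s[e]], .bal emit oc cc d false false⟩ := by
                   simp only [pvB_step, Bool.false_eq_true, and_false, if_false, if_true]
                   rw [if_neg hq, if_neg hoc, if_neg hcc]
                 rw [hs, ih (e+1) t (cur ++ [s[e]]) emit d false false (Or.inl (by simp)) (by omega)]
           · rw [if_neg hin]
             have hin' : inStr = true := by
               cases inStr
               · exact absurd rfl hin
               · rfl
             subst hin'
             have hlt : e < pvA_scan s oc cc f d true false (e+1) := by
               rcases Nat.lt_or_ge (e+1) s.length with hx | hx
               · have := pvA_scan_lt s oc cc f d true false (e+1) hx; omega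
               · rw [pvA_scan_oob s oc cc f d true false (e+1) hx]; omega
             have htok : cur ++ (s.drop e).take (pvA_scan s oc cc f d true false (e+1) - e)
                 = (cur ++ [s[e]]) ++ (s.drop (e+1)).take (pvA_scan s oc cc f d true false (e+1) - (e+1)) := by
               rw [pvSegCons s e _ h hlt]; simp
             rw [htok, List.drop_eq_getElem_cons h, List.foldl_cons]
             have hs : pvB_step ⟨t, cur, .bal emit oc cc d true false⟩ s[e]
                 = ⟨t, cur ++ [s[e]], .bal emit oc cc d true false⟩ := by
               have hb' : ¬ s[e] = '\\' := fun hx => hbs ⟨hx, rfl⟩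
               simp only [pvB_step, Bool.false_eq_true, if_false, Bool.true_eq_false, and_true]
               rw [if_neg hb', if_neg hq]
             rw [hs, ih (e+1) t (cur ++ [s[e]]) emit d true false (Or.inl (by simp)) (by omega)]
   · have hr : pvA_scan s oc cc (f+1) d inStr esc e = s.length := pvA_scan_oob s oc cc (f+1) d inStr esc e (by omega)
     have hd1 : s.drop e = ([] : List Char) := List.drop_eq_nil_of_le (by omega)
     have hd2 : s.drop s.length = ([] : List Char) := List.drop_eq_nil_of_le (by omega)
     rw [hr, hd1, hd2]
     have hcur : cur ≠ [] := by
       rcases hc with hx | hx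
       · exact hx
       · omega
     cases emit <;> simp [pvB_finish, hcur]

theorem pvL_word (s : List Char) (fuel : Nat) : ∀ (e : Nat) (t : List String) (cur : List Char),
    cur ≠ [] → s.length - e < fuel →
    pvB_finish ((s.drop e).foldl pvB_step ⟨t, cur, .top⟩)
      = pvB_finish ((s.drop (pvA_word s fuel e)).foldl pvB_step
          ⟨t ++ [String.ofList (cur ++ (s.drop e).take (pvA_word s fuel e - e))], [], .top⟩) := by
  induction fuel with
  | zero => intro e t cur hc hf; exact absurd hf (Nat.not_lt_zero _)
  | succ f ih =>
   intro e t cur hc hf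
   by_cases h : e < s.length
   · rw [pvA_word]
     simp only [dif_pos h]
     by_cases hsp : s[e] = ' '
     · rw [if_pos hsp]
       have hseg : (s.drop e).take (e - e) = ([] : List Char) := by simp
       rw [hseg, List.append_nil, List.drop_eq_getElem_cons h, List.foldl_cons, List.foldl_cons]
       have h1 : pvB_step ⟨t, cur, .top⟩ s[e] = ⟨t ++ [String.ofList cur], [], .top⟩ := by
         simp only [pvB_step]
         rw [if_pos hsp, if_neg hc]
       have h2 : pvB_step ⟨t ++ [String.ofList cur], [], .top⟩ s[e] = ⟨t ++ [String.ofList cur], [], .top⟩ := by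
         simp only [pvB_step]
         rw [if_pos hsp]
         simp
       rw [h1, h2]
     · by_cases hlb : s[e] = '['
       · rw [if_neg hsp, if_pos hlb]
         have hscan : pvA_scan s '[' ']' (s.length + 1) 0 false false e = pvA_scan s '[' ']' s.length 1 false false (e+1) := by
           conv_lhs => rw [pvA_scan]
           simp [dif_pos h, hlb]
         rw [hscan]
         have hr1 : e < pvA_scan s '[' ']' s.length 1 false false (e+1) := by
           rcases Nat.lt_or_ge (e+1) s.length with hx | hx
           · have := pvA_scan_lt s '[' ']' s.length 1 false false (e+1) hx; omega
           · rw [pvA_scan_oob s '[' ']' s.length 1 false false (e+1) hx]; omega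
         have hwge := pvA_word_ge s f (pvA_scan s '[' ']' s.length 1 false false (e+1))
         have htok : cur ++ (s.drop e).take (pvA_word s f (pvA_scan s '[' ']' s.length 1 false false (e+1)) - e)
             = ((cur ++ [s[e]]) ++ (s.drop (e+1)).take (pvA_scan s '[' ']' s.length 1 false false (e+1) - (e+1)))
               ++ (s.drop (pvA_scan s '[' ']' s.length 1 false false (e+1))).take
                   (pvA_word s f (pvA_scan s '[' ']' s.length 1 false false (e+1)) - pvA_scan s '[' ']' s.length 1 false false (e+1)) := by
           rw [pvSegCons s e _ h (by omega),
               pvSegSplit s (e+1) (pvA_scan s '[' ']' s.length 1 false false (e+1)) _ (by omega) hwge]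
           simp
         rw [htok, List.drop_eq_getElem_cons h, List.foldl_cons]
         have hstep : pvB_step ⟨t, cur, .top⟩ s[e] = ⟨t, cur ++ [s[e]], .bal false '[' ']' 1 false false⟩ := by
           simp [pvB_step, hlb]
         rw [hstep, pvL_bal s '[' ']' s.length (e+1) t (cur ++ [s[e]]) false 1 false false (Or.inl (by simp)) (by omega),
             if_neg Bool.false_ne_true,
             ih (pvA_scan s '[' ']' s.length 1 false false (e+1)) t
               ((cur ++ [s[e]]) ++ (s.drop (e+1)).take (pvA_scan s '[' ']' s.length 1 false false (e+1) - (e+1)))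
               (by simp) (by omega)]
       · by_cases hcb : s[e] = '{'
         · rw [if_neg hsp, if_neg hlb, if_pos hcb]
           have hscan : pvA_scan s '{' '}' (s.length + 1) 0 false false e = pvA_scan s '{' '}' s.length 1 false false (e+1) := by
             conv_lhs => rw [pvA_scan]
             simp [dif_pos h, hcb]
           rw [hscan]
           have hr1 : e < pvA_scan s '{' '}' s.length 1 false false (e+1) := by
             rcases Nat.lt_or_ge (e+1) s.length with hx | hx
             · have := pvA_scan_lt s '{' '}' s.length 1 false false (e+1) hx; omega
             · rw [pvA_scan_oob s '{' '}' s.length 1 false false (e+1) hx]; omega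
           have hwge := pvA_word_ge s f (pvA_scan s '{' '}' s.length 1 false false (e+1))
           have htok : cur ++ (s.drop e).take (pvA_word s f (pvA_scan s '{' '}' s.length 1 false false (e+1)) - e)
               = ((cur ++ [s[e]]) ++ (s.drop (e+1)).take (pvA_scan s '{' '}' s.length 1 false false (e+1) - (e+1)))
                 ++ (s.drop (pvA_scan s '{' '}' s.length 1 false false (e+1))).take
                     (pvA_word s f (pvA_scan s '{' '}' s.length 1 false false (e+1)) - pvA_scan s '{' '}' s.length 1 false false (e+1)) := by
             rw [pvSegCons s e _ h (by omega),
                 pvSegSplit s (e+1) (pvA_scan s '{' '}' s.length 1 false false (e+1)) _ (by omega) hwge]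
             simp
           rw [htok, List.drop_eq_getElem_cons h, List.foldl_cons]
           have hstep : pvB_step ⟨t, cur, .top⟩ s[e] = ⟨t, cur ++ [s[e]], .bal false '{' '}' 1 false false⟩ := by
             simp [pvB_step, hcb, hc]
           rw [hstep, pvL_bal s '{' '}' s.length (e+1) t (cur ++ [s[e]]) false 1 false false (Or.inl (by simp)) (by omega),
               if_neg Bool.false_ne_true,
               ih (pvA_scan s '{' '}' s.length 1 false false (e+1)) t
                 ((cur ++ [s[e]]) ++ (s.drop (e+1)).take (pvA_scan s '{' '}' s.length 1 false false (e+1) - (e+1)))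
                 (by simp) (by omega)]
         · rw [if_neg hsp, if_neg hlb, if_neg hcb]
           have hwge := pvA_word_ge s f (e+1)
           have htok : cur ++ (s.drop e).take (pvA_word s f (e+1) - e)
               = (cur ++ [s[e]]) ++ (s.drop (e+1)).take (pvA_word s f (e+1) - (e+1)) := by
             rw [pvSegCons s e _ h (by omega)]
             simp
           rw [htok, List.drop_eq_getElem_cons h, List.foldl_cons]
           have hstep : pvB_step ⟨t, cur, .top⟩ s[e] = ⟨t, cur ++ [s[e]], .top⟩ := by
             simp only [pvB_step]
             rw [if_neg hsp, if_neg (by simp [hc] : ¬ (s[e] = '"' ∧ cur = [])),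
                 if_neg (by simp [hlb, hcb] : ¬ (s[e] = '{' ∨ s[e] = '['))]
           rw [hstep, ih (e+1) t (cur ++ [s[e]]) (by simp) (by omega)]
   · have hr : pvA_word s (f+1) e = e := by
       rw [pvA_word]
       simp [h]
     have hd : s.drop e = ([] : List Char) := List.drop_eq_nil_of_le (by omega)
     rw [hr, hd]
     simp [pvB_finish, hc]

theorem pvL_main (s : List Char) (fuel : Nat) : ∀ (i : Nat) (t : List String), s.length - i < fuel →
    pvA_main s fuel t i = pvB_finish ((s.drop i).foldl pvB_step ⟨t, [], .top⟩) := by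
  induction fuel with
  | zero => intro i t hf; exact absurd hf (Nat.not_lt_zero _)
  | succ f ih =>
   intro i t hf
   by_cases h : i < s.length
   · rw [pvA_main]
     simp only [dif_pos h]
     rw [← pvL_skip s (s.length + 1) i t (by omega)]
     by_cases hj : pvA_skip s (s.length + 1) i < s.length
     · simp only [dif_pos hj]
       have hjge := pvA_skip_ge s (s.length + 1) i
       have hjsp : ¬ s[pvA_skip s (s.length + 1) i] = ' ' := by
         rcases pvA_skip_ne s (s.length + 1) i (by omega) with hx | hx
         · omega
         · rw [List.getElem?_eq_getElem hj] at hx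
           intro hy
           exact hx (by rw [hy])
       by_cases hq : s[pvA_skip s (s.length + 1) i] = '"'
       · rw [if_pos hq]
         have hge : pvA_skip s (s.length + 1) i + 1 ≤ pvA_quote s (s.length + 1) (pvA_skip s (s.length + 1) i + 1) := pvA_quote_ge s (s.length + 1) (pvA_skip s (s.length + 1) i + 1)
         have hlen : s.length - pvA_quote s (s.length + 1) (pvA_skip s (s.length + 1) i + 1) < s.length - i := by omega
         rw [ih (pvA_quote s (s.length + 1) (pvA_skip s (s.length + 1) i + 1))
               (t ++ [String.ofList ((s.drop (pvA_skip s (s.length + 1) i)).take (pvA_quote s (s.length + 1) (pvA_skip s (s.length + 1) i + 1) - pvA_skip s (s.length + 1) i))]) (by omega)]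
         have htok : (s.drop (pvA_skip s (s.length + 1) i)).take (pvA_quote s (s.length + 1) (pvA_skip s (s.length + 1) i + 1) - pvA_skip s (s.length + 1) i)
             = s[pvA_skip s (s.length + 1) i] :: (s.drop (pvA_skip s (s.length + 1) i + 1)).take (pvA_quote s (s.length + 1) (pvA_skip s (s.length + 1) i + 1) - (pvA_skip s (s.length + 1) i + 1)) := by
           rw [pvSegCons s (pvA_skip s (s.length + 1) i) _ hj (by omega)]
         rw [htok, List.drop_eq_getElem_cons hj, List.foldl_cons]
         have hstep : pvB_step ⟨t, [], .top⟩ s[pvA_skip s (s.length + 1) i] = ⟨t, [s[pvA_skip s (s.length + 1) i]], .quote false⟩ := by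
           simp [pvB_step, hq]
         rw [hstep, pvL_quote s (s.length + 1) (pvA_skip s (s.length + 1) i + 1) t [s[pvA_skip s (s.length + 1) i]] (by simp) (by omega)]
         simp
       · rw [if_neg hq]
         by_cases hcb : s[pvA_skip s (s.length + 1) i] = '{'
         · rw [if_pos hcb]
           have hscan : pvA_scan s '{' '}' (s.length + 1) 0 false false (pvA_skip s (s.length + 1) i)
               = pvA_scan s '{' '}' s.length 1 false false (pvA_skip s (s.length + 1) i + 1) := by
             conv_lhs => rw [pvA_scan]
             simp [dif_pos hj, hcb]
           rw [hscan]
           have hr1 : pvA_skip s (s.length + 1) i < pvA_scan s '{' '}' s.length 1 false false (pvA_skip s (s.length + 1) i + 1) := by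
             rcases Nat.lt_or_ge (pvA_skip s (s.length + 1) i + 1) s.length with hx | hx
             · have := pvA_scan_lt s '{' '}' s.length 1 false false (pvA_skip s (s.length + 1) i + 1) hx; omega
             · rw [pvA_scan_oob s '{' '}' s.length 1 false false (pvA_skip s (s.length + 1) i + 1) hx]; omega
           have hlen : s.length - pvA_scan s '{' '}' s.length 1 false false (pvA_skip s (s.length + 1) i + 1) < s.length - i := by omega
           rw [ih (pvA_scan s '{' '}' s.length 1 false false (pvA_skip s (s.length + 1) i + 1))
                 (t ++ [String.ofList ((s.drop (pvA_skip s (s.length + 1) i)).take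
                    (pvA_scan s '{' '}' s.length 1 false false (pvA_skip s (s.length + 1) i + 1) - pvA_skip s (s.length + 1) i))]) (by omega)]
           have htok : (s.drop (pvA_skip s (s.length + 1) i)).take (pvA_scan s '{' '}' s.length 1 false false (pvA_skip s (s.length + 1) i + 1) - pvA_skip s (s.length + 1) i)
               = s[pvA_skip s (s.length + 1) i] :: (s.drop (pvA_skip s (s.length + 1) i + 1)).take
                   (pvA_scan s '{' '}' s.length 1 false false (pvA_skip s (s.length + 1) i + 1) - (pvA_skip s (s.length + 1) i + 1)) := by
             rw [pvSegCons s (pvA_skip s (s.length + 1) i) _ hj (by omega)]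
           rw [htok, List.drop_eq_getElem_cons hj, List.foldl_cons]
           have hstep : pvB_step ⟨t, [], .top⟩ s[pvA_skip s (s.length + 1) i]
               = ⟨t, [s[pvA_skip s (s.length + 1) i]], .bal true '{' '}' 1 false false⟩ := by
             simp [pvB_step, hcb]
           rw [hstep, pvL_bal s '{' '}' s.length (pvA_skip s (s.length + 1) i + 1) t [s[pvA_skip s (s.length + 1) i]] true 1 false false
                 (Or.inl (by simp)) (by omega), if_pos rfl]
           simp
         · rw [if_neg hcb]
           have hwlt : pvA_skip s (s.length + 1) i < pvA_word s (s.length + 1) (pvA_skip s (s.length + 1) i) := by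
             apply pvA_word_lt s (s.length + 1) _ (by omega) hj
             rw [List.getElem?_eq_getElem hj]
             intro hy
             exact hjsp (by injection hy)
           by_cases hlb : s[pvA_skip s (s.length + 1) i] = '['
           · have hscan : pvA_scan s '[' ']' (s.length + 1) 0 false false (pvA_skip s (s.length + 1) i)
                 = pvA_scan s '[' ']' s.length 1 false false (pvA_skip s (s.length + 1) i + 1) := by
               conv_lhs => rw [pvA_scan]
               simp [dif_pos hj, hlb]
             have hword : pvA_word s (s.length + 1) (pvA_skip s (s.length + 1) i)
                 = pvA_word s s.length (pvA_scan s '[' ']' s.length 1 false false (pvA_skip s (s.length + 1) i + 1)) := by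
               conv_lhs => rw [pvA_word]
               simp [dif_pos hj, hlb, hscan]
             rw [hword]
             have hr1 : pvA_skip s (s.length + 1) i < pvA_scan s '[' ']' s.length 1 false false (pvA_skip s (s.length + 1) i + 1) := by
               rcases Nat.lt_or_ge (pvA_skip s (s.length + 1) i + 1) s.length with hx | hx
               · have := pvA_scan_lt s '[' ']' s.length 1 false false (pvA_skip s (s.length + 1) i + 1) hx; omega
               · rw [pvA_scan_oob s '[' ']' s.length 1 false false (pvA_skip s (s.length + 1) i + 1) hx]; omega
             have hwge := pvA_word_ge s s.length (pvA_scan s '[' ']' s.length 1 false false (pvA_skip s (s.length + 1) i + 1))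
             have hlen : s.length - pvA_word s s.length (pvA_scan s '[' ']' s.length 1 false false (pvA_skip s (s.length + 1) i + 1))
                 < s.length - i := by omega
             rw [ih (pvA_word s s.length (pvA_scan s '[' ']' s.length 1 false false (pvA_skip s (s.length + 1) i + 1)))
                   (t ++ [String.ofList ((s.drop (pvA_skip s (s.length + 1) i)).take
                      (pvA_word s s.length (pvA_scan s '[' ']' s.length 1 false false (pvA_skip s (s.length + 1) i + 1)) - pvA_skip s (s.length + 1) i))]) (by omega)]
             have htok : (s.drop (pvA_skip s (s.length + 1) i)).take
                   (pvA_word s s.length (pvA_scan s '[' ']' s.length 1 false false (pvA_skip s (s.length + 1) i + 1)) - pvA_skip s (s.length + 1) i)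
                 = ([s[pvA_skip s (s.length + 1) i]] ++ (s.drop (pvA_skip s (s.length + 1) i + 1)).take
                      (pvA_scan s '[' ']' s.length 1 false false (pvA_skip s (s.length + 1) i + 1) - (pvA_skip s (s.length + 1) i + 1)))
                   ++ (s.drop (pvA_scan s '[' ']' s.length 1 false false (pvA_skip s (s.length + 1) i + 1))).take
                       (pvA_word s s.length (pvA_scan s '[' ']' s.length 1 false false (pvA_skip s (s.length + 1) i + 1))
                         - pvA_scan s '[' ']' s.length 1 false false (pvA_skip s (s.length + 1) i + 1)) := by
               rw [pvSegCons s (pvA_skip s (s.length + 1) i) _ hj (by omega),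
                   pvSegSplit s (pvA_skip s (s.length + 1) i + 1) (pvA_scan s '[' ']' s.length 1 false false (pvA_skip s (s.length + 1) i + 1)) _
                     (by omega) hwge]
               simp
             rw [htok, List.drop_eq_getElem_cons hj, List.foldl_cons]
             have hstep : pvB_step ⟨t, [], .top⟩ s[pvA_skip s (s.length + 1) i]
                 = ⟨t, [s[pvA_skip s (s.length + 1) i]], .bal false '[' ']' 1 false false⟩ := by
               simp [pvB_step, hlb]
             rw [hstep, pvL_bal s '[' ']' s.length (pvA_skip s (s.length + 1) i + 1) t [s[pvA_skip s (s.length + 1) i]] false 1 false false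
                   (Or.inl (by simp)) (by omega), if_neg Bool.false_ne_true,
                 pvL_word s s.length (pvA_scan s '[' ']' s.length 1 false false (pvA_skip s (s.length + 1) i + 1)) t
                   ([s[pvA_skip s (s.length + 1) i]] ++ (s.drop (pvA_skip s (s.length + 1) i + 1)).take
                      (pvA_scan s '[' ']' s.length 1 false false (pvA_skip s (s.length + 1) i + 1) - (pvA_skip s (s.length + 1) i + 1)))
                   (by simp) (by omega)]
           · have hword : pvA_word s (s.length + 1) (pvA_skip s (s.length + 1) i) = pvA_word s s.length (pvA_skip s (s.length + 1) i + 1) := by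
               conv_lhs => rw [pvA_word]
               simp [dif_pos hj, hjsp, hlb, hcb]
             rw [hword]
             have hwge := pvA_word_ge s s.length (pvA_skip s (s.length + 1) i + 1)
             have hlen : s.length - pvA_word s s.length (pvA_skip s (s.length + 1) i + 1) < s.length - i := by omega
             rw [ih (pvA_word s s.length (pvA_skip s (s.length + 1) i + 1))
                   (t ++ [String.ofList ((s.drop (pvA_skip s (s.length + 1) i)).take
                      (pvA_word s s.length (pvA_skip s (s.length + 1) i + 1) - pvA_skip s (s.length + 1) i))]) (by omega)]
             have htok : (s.drop (pvA_skip s (s.length + 1) i)).take (pvA_word s s.length (pvA_skip s (s.length + 1) i + 1) - pvA_skip s (s.length + 1) i)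
                 = s[pvA_skip s (s.length + 1) i] :: (s.drop (pvA_skip s (s.length + 1) i + 1)).take
                     (pvA_word s s.length (pvA_skip s (s.length + 1) i + 1) - (pvA_skip s (s.length + 1) i + 1)) := by
               rw [pvSegCons s (pvA_skip s (s.length + 1) i) _ hj (by omega)]
             rw [htok, List.drop_eq_getElem_cons hj, List.foldl_cons]
             have hstep : pvB_step ⟨t, [], .top⟩ s[pvA_skip s (s.length + 1) i] = ⟨t, [s[pvA_skip s (s.length + 1) i]], .top⟩ := by
               simp only [pvB_step]
               rw [if_neg hjsp, if_neg (by simp [hq] : ¬ (s[pvA_skip s (s.length + 1) i] = '"' ∧ True)),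
                   if_neg (by simp [hcb, hlb] : ¬ (s[pvA_skip s (s.length + 1) i] = '{' ∨ s[pvA_skip s (s.length + 1) i] = '['))]
               simp
             rw [hstep, pvL_word s s.length (pvA_skip s (s.length + 1) i + 1) t [s[pvA_skip s (s.length + 1) i]] (by simp) (by omega)]
             simp
     · simp only [dif_neg hj]
       have hd : s.drop (pvA_skip s (s.length + 1) i) = ([] : List Char) := List.drop_eq_nil_of_le (by omega)
       rw [hd]
       simp [pvB_finish]
   · rw [pvA_main]
     have hd : s.drop i = ([] : List Char) := List.drop_eq_nil_of_le (by omega)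
     rw [hd]
     simp [h, pvB_finish]

-- ===== VERDICT (by name: the statement is the Claim_ definition above) =====
theorem tokenize_args_py_spec : Claim_equal_tokenize_args_py := by
  intro raw _
  unfold Spec_tokenize_args_py tokenize_args_py tokenize_args_py_alt
  have := pvL_main (PySem.Str.strip raw).toList ((PySem.Str.strip raw).toList.length + 1) 0 [] (by omega)
  simpa using this
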